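-- pv_equiv track=rewrite | github.com/bucknercd/forge | forge/execution/file_edits.py | full_line_spans
-- ===== SOURCE A (Python) =====
-- def normalize_newlines(text: str) -> str:
--     return text.replace("\r\n", "\n").replace("\r", "\n")
--
-- def full_line_spans(text: str) -> list[tuple[int, int, str]]:
--     """
--     For each logical line: (content_start, content_end, content) without \\n.
--     content_end is the index of the following \\n or len(text).
--     """
--     text = normalize_newlines(text)
--     res: list[tuple[int, int, str]] = []
--     i = 0
--     n = len(text)
--     while i <= n:
--         j = text.find("\n", i)
--         if j < 0:
--             res.append((i, n, text[i:n]))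
--             break
--         res.append((i, j, text[i:j]))
--         i = j + 1
--     return res
-- ===== SOURCE B (Python) =====
-- def normalize_newlines(text: str) -> str:
--     return text.replace("\r\n", "\n").replace("\r", "\n")
--
-- def full_line_spans(text: str) -> list[tuple[int, int, str]]:
--     text = normalize_newlines(text)
--     res: list[tuple[int, int, str]] = []
--     start = 0
--     for part in text.split("\n"):
--         res.append((start, start + len(part), part))
--         start += len(part) + 1
--     return res
-- ===== Notes on version B (the rewrite author's own statement) =====
-- stated objective: simpler
-- what changed: Replaces the index-tracking while-loop with repeated str.find and slicing by a single split on the newline character followed by one pass that accumulates a running offset.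
import Mathlib
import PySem

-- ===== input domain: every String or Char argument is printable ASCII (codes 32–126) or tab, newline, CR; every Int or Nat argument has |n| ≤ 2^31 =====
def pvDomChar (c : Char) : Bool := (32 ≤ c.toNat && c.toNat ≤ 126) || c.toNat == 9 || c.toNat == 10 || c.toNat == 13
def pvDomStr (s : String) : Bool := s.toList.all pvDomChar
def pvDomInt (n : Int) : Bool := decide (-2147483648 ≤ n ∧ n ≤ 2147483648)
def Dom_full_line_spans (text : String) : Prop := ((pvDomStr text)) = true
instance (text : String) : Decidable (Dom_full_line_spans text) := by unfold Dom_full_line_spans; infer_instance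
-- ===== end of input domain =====

-- B replaces A's while-loop over find("\n", i) with a split("\n") followed by one
-- offset-accumulating pass (objective: simpler).

-- ===== PORT A =====
-- helper shared by both Pythons: normalize_newlines
def pvNormalize (cs : List Char) : List Char :=
  PySem.Chars.replace (PySem.Chars.replace cs ['\r', '\n'] ['\n']) ['\r'] ['\n']

-- the while-loop of A; fuel only makes the recursion total (the loop runs at most n+1 times)
def pvALoop (t : List Char) (fuel : Nat) (i : Nat) (res : List (Int × Int × String)) :
    List (Int × Int × String) :=
  match fuel with
  | 0 => res
  | fuel + 1 =>
    if i ≤ t.length then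
      let j : Int := PySem.Chars.findFrom t ['\n'] (i : Int) none
      if j < 0 then
        res ++ [((i : Int), (t.length : Int),
                 String.ofList (PySem.Chars.slice t (some (i : Int)) (some (t.length : Int))))]
      else
        pvALoop t fuel (j.toNat + 1)
          (res ++ [((i : Int), j, String.ofList (PySem.Chars.slice t (some (i : Int)) (some j)))])
    else res

def full_line_spans (text : String) : List (Int × Int × String) :=
  pvALoop (pvNormalize text.toList) ((pvNormalize text.toList).length + 1) 0 []

-- ===== PORT B =====
def full_line_spans_alt (text : String) : List (Int × Int × String) :=
  ((PySem.Chars.splitOn (pvNormalize text.toList) ['\n']).foldl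
    (fun (st : List (Int × Int × String) × Int) part =>
      (st.1 ++ [(st.2, st.2 + (part.length : Int), String.ofList part)],
       st.2 + (part.length : Int) + 1))
    ([], 0)).1

-- ===== PRECONDITION & SPEC =====
def Spec_full_line_spans (text : String) (out : List (Int × Int × String)) : Prop := out = full_line_spans_alt text
instance (text : String) (out : List (Int × Int × String)) : Decidable (Spec_full_line_spans text out) := by unfold Spec_full_line_spans; infer_instance

-- ===== CLAIM (what is proved, stated in full; the proofs are below) =====
def Claim_equal_full_line_spans : Prop := ∀ (text : String), Dom_full_line_spans text → Spec_full_line_spans text (full_line_spans text)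

-- ===== LEMMAS AND PROOFS =====

-- reference splitter: split on '\n', structurally
def pvLines : List Char → List (List Char)
  | [] => [[]]
  | c :: rest =>
    if c = '\n' then [] :: pvLines rest
    else match pvLines rest with
      | [] => [[c]]
      | x :: xs => (c :: x) :: xs

def pvConsHead (p : List Char) : List (List Char) → List (List Char)
  | [] => [p]
  | x :: xs => (p ++ x) :: xs

-- reference spans over the line pieces
def pvSpans : List (List Char) → Nat → List (Int × Int × String)
  | [], _ => []
  | p :: ps, start =>
    ((start : Int), (start : Int) + (p.length : Int), String.ofList p) :: pvSpans ps (start + p.length + 1)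

theorem pvLines_ne_nil (s : List Char) : pvLines s ≠ [] := by
  cases s with
  | nil => simp [pvLines]
  | cons c rest =>
    simp only [pvLines]
    split
    · simp
    · cases pvLines rest <;> simp

theorem pvConsHead_nil_of_ne (ls : List (List Char)) (h : ls ≠ []) : pvConsHead [] ls = ls := by
  cases ls with
  | nil => exact absurd rfl h
  | cons x xs => simp [pvConsHead]

theorem pvConsHead_assoc (p q : List Char) (ls : List (List Char)) :
    pvConsHead p (pvConsHead q ls) = pvConsHead (p ++ q) ls := by
  cases ls <;> simp [pvConsHead]

theorem pvLines_cons (c : Char) (rest : List Char) :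
    pvLines (c :: rest) = if c = '\n' then [] :: pvLines rest else pvConsHead [c] (pvLines rest) := by
  simp only [pvLines]
  split
  · rfl
  · cases h : pvLines rest <;> simp [pvConsHead]

theorem splitOn_go_eq (fuel : Nat) : ∀ (l cur : List Char) (acc : List (List Char)),
    l.length < fuel →
    PySem.Chars.splitOn.go ['\n'] fuel l cur acc
      = acc.reverse ++ pvConsHead cur.reverse (pvLines l) := by
  induction fuel with
  | zero => intro l cur acc h; omega
  | succ fuel ih =>
    intro l cur acc h
    cases l with
    | nil =>
      simp [PySem.Chars.splitOn.go, pvLines, pvConsHead]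
    | cons c rest =>
      by_cases hc : c = '\n'
      · subst hc
        have hpre : List.isPrefixOf ['\n'] ('\n' :: rest) = true := by
          simp [List.isPrefixOf]
        rw [PySem.Chars.splitOn.go]
        simp only [hpre, if_true, List.length_singleton, List.drop_succ_cons, List.drop_zero]
        rw [ih rest [] (cur.reverse :: acc) (by simpa using Nat.lt_of_succ_lt_succ h)]
        rw [show ([] : List Char).reverse = [] from rfl]
        rw [pvConsHead_nil_of_ne _ (pvLines_ne_nil rest), pvLines_cons]
        simp [pvConsHead]
      · have hpre : List.isPrefixOf ['\n'] (c :: rest) = false := by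
          simp [List.isPrefixOf]
          exact fun hh => absurd hh.symm hc
        rw [PySem.Chars.splitOn.go]
        simp only [hpre, if_false, Bool.false_eq_true]
        rw [ih rest (c :: cur) acc (by simpa using Nat.lt_of_succ_lt_succ h)]
        rw [pvLines_cons]
        simp only [hc, if_false]
        rw [pvConsHead_assoc]
        simp

theorem splitOn_eq_pvLines (s : List Char) :
    PySem.Chars.splitOn s ['\n'] = pvLines s := by
  show PySem.Chars.splitOn.go ['\n'] (s.length + 1) s [] [] = _
  rw [splitOn_go_eq (s.length + 1) s [] [] (by omega)]
  simp [pvConsHead_nil_of_ne _ (pvLines_ne_nil s)]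

-- pvLines on a newline-free list and on a first-newline decomposition
theorem pvLines_no_newline (s : List Char) (h : '\n' ∉ s) : pvLines s = [s] := by
  induction s with
  | nil => rfl
  | cons c rest ih =>
    rw [pvLines_cons]
    have hc : c ≠ '\n' := fun hh => h (hh ▸ List.mem_cons_self)
    have hr : '\n' ∉ rest := fun hh => h (List.mem_cons_of_mem _ hh)
    simp [hc, ih hr, pvConsHead]

theorem pvLines_append_newline (a b : List Char) (ha : '\n' ∉ a) :
    pvLines (a ++ '\n' :: b) = a :: pvLines b := by
  induction a with
  | nil => simp [pvLines_cons]
  | cons c arest ih =>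
    have hc : c ≠ '\n' := fun hh => ha (hh ▸ List.mem_cons_self)
    have hr : '\n' ∉ arest := fun hh => ha (List.mem_cons_of_mem _ hh)
    rw [List.cons_append, pvLines_cons]
    simp [hc, ih hr, pvConsHead]

-- first-occurrence characterisation of find for a single character
theorem find_eq_neg_one_of_not_mem (s : List Char) (h : '\n' ∉ s) :
    PySem.Chars.find s ['\n'] = -1 := by
  rw [PySem.Chars.find_eq_neg_one_iff]
  intro hinf
  exact h (hinf.mem List.mem_cons_self)

theorem find_of_first (a b : List Char) (ha : '\n' ∉ a) :
    PySem.Chars.find (a ++ '\n' :: b) ['\n'] = (a.length : Int) := by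
  set s := a ++ '\n' :: b with hs
  have hmem : ['\n'] <:+: s := ⟨a, b, by simp [hs]⟩
  have hnn : 0 ≤ PySem.Chars.find s ['\n'] := (PySem.Chars.find_nonneg_iff s ['\n']).mpr hmem
  obtain ⟨hpre, hmin⟩ := PySem.Chars.find_spec (s := s) (sub := ['\n']) hnn
  have hsd : s.drop a.length = '\n' :: b := by rw [hs]; simp
  have hat : ['\n'] <+: s.drop a.length := by rw [hsd]; exact ⟨b, rfl⟩
  have hnot : ∀ i < a.length, ¬ ['\n'] <+: s.drop i := by
    intro i hi hp
    have hsdi : s.drop i = a.drop i ++ '\n' :: b := by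
      rw [hs, List.drop_append_of_le_length (le_of_lt hi)]
    cases hd : a.drop i with
    | nil =>
      have := congrArg List.length hd
      simp at this
      omega
    | cons x xs =>
      obtain ⟨t, ht⟩ := hp
      rw [hsdi, hd] at ht
      simp only [List.cons_append] at ht
      have hx : x ∈ a := List.mem_of_mem_drop (hd ▸ List.mem_cons_self)
      injection ht with h1 _
      exact ha (h1 ▸ hx)
  have h1 : a.length ≤ (PySem.Chars.find s ['\n']).toNat := by
    by_contra hlt
    exact hnot _ (by omega) hpre
  have h2 : ¬ a.length < (PySem.Chars.find s ['\n']).toNat := fun hlt => hmin _ hlt hat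
  omega

-- the A-loop computes pvSpans of pvLines of the suffix
theorem pvALoop_eq (fuel : Nat) : ∀ (t : List Char) (i : Nat) (res : List (Int × Int × String)),
    i ≤ t.length → t.length + 1 ≤ fuel + i →
    pvALoop t fuel i res = res ++ pvSpans (pvLines (t.drop i)) i := by
  induction fuel with
  | zero => intro t i res h1 h2; omega
  | succ fuel ih =>
    intro t i res h1 h2
    rw [pvALoop]
    simp only [if_pos h1]
    have hfind : PySem.Chars.findFrom t ['\n'] (i : Int) none
        = if PySem.Chars.find (t.drop i) ['\n'] = -1 then -1
          else (i : Int) + PySem.Chars.find (t.drop i) ['\n'] :=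
      PySem.Chars.findFrom_natCast t ['\n'] i h1
    by_cases hmem : '\n' ∈ t.drop i
    · -- a newline exists in the suffix: decompose it at the first newline
      set s := t.drop i with hsdef
      obtain ⟨a, b, hab⟩ : ∃ a b, s = a ++ '\n' :: b ∧ '\n' ∉ a := by
        -- decompose at the FIRST newline via takeWhile/dropWhile
        refine ⟨s.takeWhile (fun c => !(c = '\n')), (s.dropWhile (fun c => !(c = '\n'))).tail, ?_, ?_⟩
        · have hne : s.dropWhile (fun c => !(c = '\n')) ≠ [] := by
            intro hnil
            have htw : s.takeWhile (fun c => !(c = '\n')) = s := by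
              conv_rhs => rw [← List.takeWhile_append_dropWhile (p := fun c => !(c = '\n')) (l := s)]
              rw [hnil, List.append_nil]
            rw [← htw] at hmem
            have := List.mem_takeWhile_imp hmem
            simp at this
          have hhead : (s.dropWhile (fun c => !(c = '\n'))).head hne = '\n' := by
            have := List.head_dropWhile_not (p := fun c => !(c = '\n')) (l := s) hne
            simpa using this
          have hdw : s.dropWhile (fun c => !(c = '\n'))
              = '\n' :: (s.dropWhile (fun c => !(c = '\n'))).tail := by
            conv_lhs => rw [← List.cons_head_tail hne]
            rw [hhead]
          conv_lhs => rw [← List.takeWhile_append_dropWhile (p := fun c => !(c = '\n')) (l := s), hdw]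
        · intro hin
          have := List.mem_takeWhile_imp hin
          simp at this
      obtain ⟨hab, hnota⟩ := hab
      have hfind2 : PySem.Chars.find s ['\n'] = (a.length : Int) := by
        rw [hab]; exact find_of_first a b hnota
      rw [hfind, hfind2]
      have hne1 : ¬ ((a.length : Int) = -1) := by omega
      simp only [hne1, if_false]
      have hlt : ¬ ((i : Int) + (a.length : Int) < 0) := by omega
      simp only [hlt, if_false]
      have htn : ((i : Int) + (a.length : Int)).toNat = i + a.length := by omega
      have hslen : s.length = a.length + 1 + b.length := by rw [hab]; simp; omega
      have hslen' : s.length = t.length - i := by rw [hsdef]; simp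
      have hbound : i + a.length + 1 ≤ t.length := by omega
      have hdrop : t.drop (i + a.length + 1) = b := by
        have : t.drop (i + a.length + 1) = s.drop (a.length + 1) := by
          rw [hsdef, List.drop_drop]; ring_nf
        rw [this, hab]
        rw [show a.length + 1 = (a ++ ['\n']).length by simp]
        rw [show a ++ '\n' :: b = (a ++ ['\n']) ++ b by simp]
        simp
      have hslice : PySem.Chars.slice t (some (i : Int)) (some ((i : Int) + (a.length : Int))) = a := by
        simp only [PySem.Chars.slice_eq_listSlice]
        rw [show ((i:Int) + (a.length:Int)) = ((i + a.length : Nat) : Int) by push_cast; ring]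
        rw [PySem.List.slice_natCast]
        rw [show i + a.length - i = a.length by omega, ← hsdef, hab]
        simp
      rw [htn, ih t (i + a.length + 1) _ hbound (by omega), hdrop]
      rw [hab, pvLines_append_newline a b hnota]
      simp only [pvSpans, hslice, List.append_assoc, List.singleton_append]
    · -- no newline in the suffix
      have hf : PySem.Chars.find (t.drop i) ['\n'] = -1 := find_eq_neg_one_of_not_mem _ hmem
      rw [hfind, hf]
      norm_num
      rw [pvLines_no_newline _ hmem]
      have hslice : PySem.List.slice t (some (i : Int)) (some (t.length : Int)) = t.drop i := by
        rw [PySem.List.slice_natCast]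
        exact List.take_of_length_le (by simp)
      have hlen : (i : Int) + ((t.drop i).length : Int) = (t.length : Int) := by
        simp
        omega
      simp only [pvSpans, hslice]
      rw [← hlen]

-- the B-fold computes pvSpans of the part list
theorem foldl_eq_pvSpans (parts : List (List Char)) :
    ∀ (res : List (Int × Int × String)) (start : Nat),
    (parts.foldl
      (fun (st : List (Int × Int × String) × Int) part =>
        (st.1 ++ [(st.2, st.2 + (part.length : Int), String.ofList part)],
         st.2 + (part.length : Int) + 1))
      (res, (start : Int))).1 = res ++ pvSpans parts start := by
  induction parts with
  | nil => intro res start; simp [pvSpans]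
  | cons p ps ih =>
    intro res start
    simp only [List.foldl_cons]
    rw [show ((start : Int) + (p.length : Int) + 1) = ((start + p.length + 1 : Nat) : Int) by push_cast; ring]
    rw [ih]
    simp [pvSpans]

-- ===== VERDICT (by name: the statement is the Claim_ definition above) =====
theorem full_line_spans_spec : Claim_equal_full_line_spans := by
  intro text _
  show full_line_spans text = full_line_spans_alt text
  unfold full_line_spans full_line_spans_alt
  set t := pvNormalize text.toList with ht
  rw [pvALoop_eq (t.length + 1) t 0 [] (by omega) (by omega), splitOn_eq_pvLines]
  simpa using (foldl_eq_pvSpans (pvLines t) [] 0).symm
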